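-- pv_equiv track=rewrite | github.com/DarkStarSword/wmii-config | plugins/display.py | intersectResolutions
-- ===== SOURCE A (Python) =====
-- def intersectResolutions(displays):
--   """
--   Find the subset of resolutions supported by all displays
--   """
--   intersect = None
--   for display in displays:
--     resolutions = displays[display]
--     if intersect is None:
--       intersect = resolutions
--     else:
--       intersect = [r for r in resolutions if r in intersect]
--   return intersect
-- ===== SOURCE B (Python) =====
-- def intersectResolutions(displays):
--   """
--   Find the subset of resolutions supported by all displays
--   """
--   if not displays:
--     return None
--   values = list(displays.values())
--   counts = {}
--   for vs in values:
--     for r in set(vs):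
--       counts[r] = counts.get(r, 0) + 1
--   n = len(values)
--   return [r for r in values[-1] if counts[r] == n]
-- ===== Notes on version B (the rewrite author's own statement) =====
-- stated objective: alternative
-- what changed: Replaces A's progressive list-intersection fold (rebuilding the candidate list at every display) by an occurrence-counting scheme: count, per distinct resolution, in how many displays it occurs, then emit the last display's list keeping exactly the resolutions whose count equals the number of displays.
import Mathlib
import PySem

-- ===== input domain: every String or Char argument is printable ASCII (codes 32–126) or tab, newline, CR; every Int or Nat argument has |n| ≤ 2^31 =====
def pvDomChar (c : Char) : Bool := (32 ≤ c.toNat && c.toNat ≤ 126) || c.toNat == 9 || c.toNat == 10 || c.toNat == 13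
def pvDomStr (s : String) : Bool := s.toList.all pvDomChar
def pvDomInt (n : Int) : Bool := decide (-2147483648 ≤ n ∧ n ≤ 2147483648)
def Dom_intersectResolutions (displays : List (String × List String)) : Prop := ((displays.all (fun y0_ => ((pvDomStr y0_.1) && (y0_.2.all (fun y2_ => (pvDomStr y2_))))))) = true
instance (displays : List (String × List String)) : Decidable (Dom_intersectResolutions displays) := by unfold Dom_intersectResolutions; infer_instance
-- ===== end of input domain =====

-- B replaces A's progressive list-intersection fold by an occurrence-counting scheme
-- (count per distinct resolution how many displays carry it, keep those counted in all),
-- objective: alternative; A's single-display identity of the returned list object is a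
-- Python-only artefact, values agree.

-- ===== PORT A =====
-- 'for display in displays' iterates the dict's keys; 'displays[display]' is the dict lookup.
def intersectResolutions (displays : List (String × List String)) : Option (List String) :=
  (displays.map Prod.fst).foldl
    (fun intersect display =>
      let resolutions := PySem.Dict.getD (PySem.Dict.mk displays) display []
      match intersect with
      | none => some resolutions
      | some i => some (resolutions.filter (fun r => i.contains r)))
    none

-- ===== PORT B =====
-- counts[r] in the comprehension never raises: r stems from the last displays list, which
-- contributed to counts; getD's default 0 is thus never taken there.
def intersectResolutions_alt (displays : List (String × List String)) : Option (List String) :=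
  if displays = [] then none
  else
    let values := displays.map Prod.snd
    let counts :=
      values.foldl
        (fun d vs =>
          (PySem.Set.ofList vs).foldl (fun d r => d.insert r (d.getD r 0 + 1)) d)
        PySem.Dict.empty
    let n : Int := values.length
    some ((values.getLastD []).filter (fun r => counts.getD r 0 == n))

-- ===== PRECONDITION & SPEC =====
-- Pre_ excludes association lists with duplicate keys: they have no Python-dict counterpart
-- (dict construction collapses duplicates), so the Lean assoc-list inputs would be an
-- accidental corner; A and B agree on the collapsed dict anyway.
def Pre_intersectResolutions (displays : List (String × List String)) : Prop :=
  (displays.map Prod.fst).Nodup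
instance (displays : List (String × List String)) : Decidable (Pre_intersectResolutions displays) := by unfold Pre_intersectResolutions; infer_instance

def pvWitness_intersectResolutions : (List (String × List String)) :=
  [("LVDS1", ["1024x768", "800x600"]), ("VGA1", ["800x600", "1024x768"])]

def Spec_intersectResolutions (displays : List (String × List String)) (out : Option (List String)) : Prop := out = intersectResolutions_alt displays
instance (displays : List (String × List String)) (out : Option (List String)) : Decidable (Spec_intersectResolutions displays out) := by unfold Spec_intersectResolutions; infer_instance

-- ===== CLAIM (what is proved, stated in full; the proofs are below) =====
def Claim_equal_intersectResolutions : Prop := ∀ (displays : List (String × List String)), Dom_intersectResolutions displays → Pre_intersectResolutions displays → Spec_intersectResolutions displays (intersectResolutions displays)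

-- ===== LEMMAS AND PROOFS =====

-- A with nodup keys: each lookup returns that pair's value, so the fold runs over the values.
lemma pv_A_eq_fold_values (displays : List (String × List String))
    (h : (displays.map Prod.fst).Nodup) :
    intersectResolutions displays =
      (displays.map Prod.snd).foldl
        (fun intersect v =>
          match intersect with
          | none => some v
          | some i => some (v.filter (fun r => i.contains r))) none := by
  unfold intersectResolutions
  rw [List.foldl_map, List.foldl_map]
  apply PySem.List.foldl_congr_mem
  intro acc kv hkv
  obtain ⟨k, v⟩ := kv
  have hv : PySem.Dict.getD (PySem.Dict.mk displays) k [] = v :=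
    PySem.Dict.getD_of_mem_items (d := PySem.Dict.mk displays) (by exact hkv) (by simpa using h) []
  simp [hv]

-- Unrolling A's fold from the 'none' seed.
lemma pv_fold_some (rest : List (List String)) (acc : List String) :
    rest.foldl
      (fun intersect v =>
        match intersect with
        | none => some v
        | some i => some (v.filter (fun r => i.contains r))) (some acc) =
    some (rest.foldl (fun i v => v.filter (fun r => i.contains r)) acc) := by
  induction rest generalizing acc with
  | nil => rfl
  | cons v rest ih =>
    rw [List.foldl_cons, List.foldl_cons]
    exact ih _

-- Membership through A's progressive intersection.
lemma pv_mem_afold (rest : List (List String)) (acc : List String) (x : String) :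
    x ∈ rest.foldl (fun i v => v.filter (fun r => i.contains r)) acc ↔
      x ∈ acc ∧ ∀ v ∈ rest, x ∈ v := by
  induction rest generalizing acc with
  | nil => simp
  | cons v rest ih =>
    simp only [List.foldl_cons, ih, List.mem_filter, List.mem_cons]
    constructor
    · rintro ⟨⟨hxv, hxa⟩, hall⟩
      exact ⟨by simpa using hxa, fun u hu => hu.elim (fun h => h ▸ hxv) (hall u)⟩
    · rintro ⟨hxa, hall⟩
      exact ⟨⟨hall v (Or.inl rfl), by simpa using hxa⟩, fun u hu => hall u (Or.inr hu)⟩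

-- A's progressive fold equals the last list filtered by 'present everywhere'.
lemma pv_afold_eq_last_filter (rest : List (List String)) (v0 : List String) :
    rest.foldl (fun i v => v.filter (fun r => i.contains r)) v0 =
      (rest.getLastD v0).filter (fun r => decide (∀ v ∈ v0 :: rest, r ∈ v)) := by
  induction rest using List.reverseRecOn with
  | nil =>
    simp only [List.foldl_nil, List.getLastD_nil]
    refine (List.filter_eq_self.mpr (fun x hx => ?_)).symm
    simp [hx]
  | append_singleton vs v ih =>
    simp only [List.foldl_append, List.foldl_cons, List.foldl_nil, List.getLastD_concat]
    refine List.filter_congr (fun x hx => ?_)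
    have h1 := pv_mem_afold vs v0 x
    rw [List.contains_eq_mem]
    simp only [decide_eq_decide, h1, List.mem_cons, List.mem_append]
    constructor
    · rintro ⟨hv0, hall⟩ u hu
      rcases hu with rfl | hu
      · exact hv0
      rcases hu with hu | hu
      · exact hall u hu
      · rcases hu with rfl | hu
        · exact hx
        · simp at hu
    · intro hall
      exact ⟨hall v0 (Or.inl rfl), fun u hu => hall u (Or.inr (Or.inl hu))⟩

-- B's counter: the count of r is the number of lists containing r.
lemma pv_count_getD (values : List (List String)) (d : PySem.Dict String Int) (r : String) :
    (values.foldl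
        (fun d vs =>
          (PySem.Set.ofList vs).foldl (fun d r => d.insert r (d.getD r 0 + 1)) d)
        d).getD r 0 =
      d.getD r 0 + (values.countP (fun vs => vs.contains r) : Int) := by
  induction values generalizing d with
  | nil => simp
  | cons vs rest ih =>
    rw [List.foldl_cons, ih, PySem.Dict.getD_foldl_insert_add_one, List.countP_cons]
    have hcount : (PySem.Set.ofList vs).count r = if vs.contains r then 1 else 0 := by
      by_cases hr : r ∈ vs
      · rw [if_pos (by simpa using hr)]
        exact List.count_eq_one_of_mem (PySem.Set.nodup_ofList vs) (by simpa [PySem.Set.mem_ofList] using hr)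
      · rw [if_neg (by simpa using hr)]
        exact List.count_eq_zero_of_not_mem (by simpa [PySem.Set.mem_ofList] using hr)
    rw [hcount]
    split_ifs <;> push_cast <;> ring

-- A's none-seeded option fold over a nonempty list, in one step.
lemma pv_fold_none (v0 : List String) (rest : List (List String)) :
    (v0 :: rest).foldl
      (fun intersect v =>
        match intersect with
        | none => some v
        | some i => some (v.filter (fun r => i.contains r))) none =
    some (rest.foldl (fun i v => v.filter (fun r => i.contains r)) v0) := by
  rw [List.foldl_cons]
  exact pv_fold_some _ _

-- B's kept-condition is exactly 'present in every list'.
lemma pv_pred_eq (values : List (List String)) (r : String) :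
    ((values.foldl
        (fun d vs =>
          (PySem.Set.ofList vs).foldl (fun d r => d.insert r (d.getD r 0 + 1)) d)
        PySem.Dict.empty).getD r 0 == (values.length : Int)) =
      decide (∀ v ∈ values, r ∈ v) := by
  rw [pv_count_getD]
  simp only [PySem.Dict.getD_empty, zero_add]
  rw [Bool.eq_iff_iff]
  simp only [beq_iff_eq, decide_eq_true_eq, Nat.cast_inj, List.countP_eq_length]
  constructor <;> intro h v hv <;> simpa using h v hv

-- ===== VERDICT (by name: the statement is the Claim_ definition above) =====
theorem intersectResolutions_spec : Claim_equal_intersectResolutions := by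
  intro displays _ hpre
  unfold Spec_intersectResolutions intersectResolutions_alt
  rw [pv_A_eq_fold_values displays hpre]
  by_cases hd : displays = []
  · subst hd; rfl
  · rw [if_neg hd]
    cases hmv : displays.map Prod.snd with
    | nil => exact absurd (List.map_eq_nil_iff.mp hmv) hd
    | cons v0 rest =>
      simp only [pv_fold_none, pv_afold_eq_last_filter, List.getLastD_cons]
      congr 1
      apply List.filter_congr
      intro x _
      exact (pv_pred_eq (v0 :: rest) x).symm
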